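-- pv_equiv track=rewrite | github.com/ludia8888/SPICE-Harvester | backend/shared/services/pipeline/pipeline_expression_utils.py | normalize_preview_comparison_expression
-- ===== SOURCE A (Python) =====
-- def normalize_preview_comparison_expression(expression: str) -> str:
--     """Translate standalone Spark-style '=' comparisons to Python '=='.
--
--     The rewrite is quote-aware so string literals such as ``"a=b"`` remain unchanged.
--     """
--     text = str(expression or "")
--     if not text:
--         return text
--
--     out: list[str] = []
--     in_single = False
--     in_double = False
--     escaped = False
--     length = len(text)
--
--     for index, char in enumerate(text):
--         if escaped:
--             out.append(char)
--             escaped = False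
--             continue
--
--         if char == "\\":
--             out.append(char)
--             escaped = True
--             continue
--
--         if char == "'" and not in_double:
--             in_single = not in_single
--             out.append(char)
--             continue
--
--         if char == '"' and not in_single:
--             in_double = not in_double
--             out.append(char)
--             continue
--
--         if char == "=" and not in_single and not in_double:
--             prev_char = text[index - 1] if index > 0 else ""
--             next_char = text[index + 1] if index + 1 < length else ""
--             if prev_char not in "<>=!" and next_char != "=":
--                 out.append("==")
--                 continue
--
--         out.append(char)
--
--     return "".join(out)
-- ===== SOURCE B (Python) =====
-- def normalize_preview_comparison_expression(expression: str) -> str: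
--     """Two-pass rewrite: first mark escaped/quoted positions, then rewrite '=' outside them."""
--     text = str(expression or "")
--     n = len(text)
--
--     # Pass 1: literal[i] is True when character i is escaped, is a quote/backslash
--     # handled verbatim, or lies inside a quoted string.
--     literal = [False] * n
--     in_single = in_double = escaped = False
--     for i, ch in enumerate(text):
--         if escaped:
--             literal[i] = True
--             escaped = False
--         elif ch == "\\":
--             literal[i] = True
--             escaped = True
--         elif ch == "'" and not in_double:
--             literal[i] = True
--             in_single = not in_single
--         elif ch == '"' and not in_single:
--             literal[i] = True
--             in_double = not in_double
--         else:
--             literal[i] = in_single or in_double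
--
--     # Pass 2: rewrite standalone '=' at non-literal positions.
--     parts = []
--     for i, ch in enumerate(text):
--         if (ch == "=" and not literal[i] and i > 0
--                 and text[i - 1] not in "<>=!"
--                 and (i + 1 == n or text[i + 1] != "=")):
--             parts.append("==")
--         else:
--             parts.append(ch)
--     return "".join(parts)
-- ===== Notes on version B (the rewrite author's own statement) =====
-- stated objective: alternative
-- what changed: A's single fused quote-aware loop is split into two passes: pass one runs the escape/quote state machine only to build a boolean literal-mask, pass two rewrites standalone '=' to '==' at unmasked positions using raw neighbour characters.
import Mathlib
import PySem

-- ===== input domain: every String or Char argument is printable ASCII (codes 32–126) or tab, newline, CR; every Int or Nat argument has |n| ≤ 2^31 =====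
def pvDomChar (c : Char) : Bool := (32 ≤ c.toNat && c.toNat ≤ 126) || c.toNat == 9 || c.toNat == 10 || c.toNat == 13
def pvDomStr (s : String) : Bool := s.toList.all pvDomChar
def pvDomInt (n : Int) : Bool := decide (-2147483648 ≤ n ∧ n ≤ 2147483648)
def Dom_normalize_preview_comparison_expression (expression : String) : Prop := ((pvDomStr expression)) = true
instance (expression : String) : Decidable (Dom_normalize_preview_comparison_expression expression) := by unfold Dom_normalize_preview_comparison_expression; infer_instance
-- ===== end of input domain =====

-- B rewrites the expression in two separate passes (quote/escape mask first, then the '='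
-- rewrite) instead of A's single fused state-machine loop; objective: alternative decomposition.

-- ===== PORT A =====
-- the character set "<>=!" of A's prev_char test
def pvAset : List Char := ['<', '>', '=', '!']

-- A's single loop: state (in_single, in_double, escaped), index i over the full text tl.
-- In Python, prev_char = "" at index 0 and "" in "<>=!" is True, so the rewrite
-- additionally requires 0 < i; next_char = "" at the end and "" != "=" holds.
def pvGoA (tl : List Char) (len : Nat) : List Char → Nat → Bool → Bool → Bool → List String
  | [], _, _, _, _ => []
  | c :: rest, i, s, d, e =>
    if e = true then String.ofList [c] :: pvGoA tl len rest (i + 1) s d false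
    else if c = '\\' then String.ofList [c] :: pvGoA tl len rest (i + 1) s d true
    else if c = '\'' ∧ d = false then String.ofList [c] :: pvGoA tl len rest (i + 1) (!s) d e
    else if c = '"' ∧ s = false then String.ofList [c] :: pvGoA tl len rest (i + 1) s (!d) e
    else if c = '=' ∧ s = false ∧ d = false ∧
              (0 < i ∧ tl.getD (i - 1) ' ' ∉ pvAset) ∧
              ¬ (i + 1 < len ∧ tl.getD (i + 1) ' ' = '=') then
      "==" :: pvGoA tl len rest (i + 1) s d e
    else String.ofList [c] :: pvGoA tl len rest (i + 1) s d e

def normalize_preview_comparison_expression (expression : String) : String :=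
  let text := expression
  if text = "" then text
  else
    let tl := text.toList
    PySem.Str.join "" (pvGoA tl tl.length tl 0 false false false)

-- ===== PORT B =====
-- B pass 1: literal mask — one Bool per character.
def pvMask : List Char → Bool → Bool → Bool → List Bool
  | [], _, _, _ => []
  | c :: rest, s, d, e =>
    if e = true then true :: pvMask rest s d false
    else if c = '\\' then true :: pvMask rest s d true
    else if c = '\'' ∧ d = false then true :: pvMask rest (!s) d e
    else if c = '"' ∧ s = false then true :: pvMask rest s (!d) e
    else (s || d) :: pvMask rest s d e

-- B pass 2: rewrite '=' at unmasked positions, walking text and mask in lockstep.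
def pvRewrite (tl : List Char) (n : Nat) : List Char → List Bool → Nat → List String
  | [], _, _ => []
  | _ :: _, [], _ => []  -- unreachable: mask has the same length as the text
  | c :: rest, lit :: lm, i =>
    if c = '=' ∧ lit = false ∧ 0 < i ∧ tl.getD (i - 1) ' ' ∉ pvAset ∧
        (i + 1 = n ∨ tl.getD (i + 1) ' ' ≠ '=') then
      "==" :: pvRewrite tl n rest lm (i + 1)
    else String.ofList [c] :: pvRewrite tl n rest lm (i + 1)

def normalize_preview_comparison_expression_alt (expression : String) : String :=
  let tl := expression.toList
  PySem.Str.join "" (pvRewrite tl tl.length tl (pvMask tl false false false) 0)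

-- ===== PRECONDITION & SPEC =====
def Spec_normalize_preview_comparison_expression (expression : String) (out : String) : Prop := out = normalize_preview_comparison_expression_alt expression
instance (expression : String) (out : String) : Decidable (Spec_normalize_preview_comparison_expression expression out) := by unfold Spec_normalize_preview_comparison_expression; infer_instance

-- ===== CLAIM (what is proved, stated in full; the proofs are below) =====
def Claim_equal_normalize_preview_comparison_expression : Prop := ∀ (expression : String), Dom_normalize_preview_comparison_expression expression → Spec_normalize_preview_comparison_expression expression (normalize_preview_comparison_expression expression)

-- ===== LEMMAS AND PROOFS =====

-- mask-then-rewrite equals the fused loop, for any starting state, as long as the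
-- running index is consistent with the suffix being processed (i + |cs| = |tl|).
theorem pvRewrite_pvMask_eq_pvGoA (tl : List Char) (cs : List Char) (i : Nat) (s d e : Bool)
    (h : i + cs.length = tl.length) :
    pvRewrite tl tl.length cs (pvMask cs s d e) i = pvGoA tl tl.length cs i s d e := by
  induction cs generalizing i s d e with
  | nil => simp [pvRewrite, pvGoA]
  | cons c rest ih =>
    have h' : i + 1 + rest.length = tl.length := by simp at h; omega
    simp only [pvMask, pvGoA]
    split_ifs with h1 h2 h3 h4 h5
    · simp only [pvRewrite]; rw [if_neg (by simp), ih _ _ _ _ h']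
    · simp only [pvRewrite]; rw [if_neg (by simp), ih _ _ _ _ h']
    · simp only [pvRewrite]; rw [if_neg (by simp), ih _ _ _ _ h']
    · simp only [pvRewrite]; rw [if_neg (by simp), ih _ _ _ _ h']
    · simp only [pvRewrite]
      obtain ⟨hc, hs, hd, ⟨hi, hp⟩, hn⟩ := h5
      rw [if_pos ?_, ih _ _ _ _ h']
      refine ⟨hc, by simp [hs, hd], hi, hp, ?_⟩
      by_cases hend : i + 1 = tl.length
      · exact Or.inl hend
      · refine Or.inr (fun hx => hn ⟨by simp at h; omega, hx⟩)
    · simp only [pvRewrite]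
      rw [if_neg ?_, ih _ _ _ _ h']
      rintro ⟨hc, hl, hi, hp, hn⟩
      have hs : s = false := by cases s <;> simp_all
      have hdd : d = false := by cases d <;> simp_all
      exact h5 ⟨hc, hs, hdd, ⟨hi, hp⟩, fun ⟨hx, hy⟩ => by
        rcases hn with hn | hn
        · omega
        · exact hn hy⟩

-- ===== VERDICT (by name: the statement is the Claim_ definition above) =====
theorem normalize_preview_comparison_expression_spec : Claim_equal_normalize_preview_comparison_expression := by
  intro expression _
  unfold Spec_normalize_preview_comparison_expression
  unfold normalize_preview_comparison_expression normalize_preview_comparison_expression_alt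
  by_cases h : expression = ""
  · subst h; decide
  · rw [if_neg h]
    show PySem.Str.join "" (pvGoA expression.toList expression.toList.length expression.toList 0 false false false)
       = PySem.Str.join "" (pvRewrite expression.toList expression.toList.length expression.toList (pvMask expression.toList false false false) 0)
    rw [pvRewrite_pvMask_eq_pvGoA _ _ _ _ _ _ (by simp)]
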